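-- pv_equiv track=rewrite | github.com/Delisseu/Euler-s-Project | Features/MathOperations.py | period_approx
-- ===== SOURCE A (Python) =====
-- def period_approx(a0: int, period: (tuple[int], iter, list[int])) -> tuple[int, int]:
--     """
--         Строит подходящую дробь, соответствующую фундаментальному решению уравнения Пелля.
--
--         :param a0: Целая часть квадратного корня (из sqrt_approx).
--         :param period: Периодическая часть разложения (без последнего элемента, если период чётный).
--         :return: Кортеж (x, y), где x и y — решение уравнения x^2 - D * y^2 = 1.
--         """
--     # Начальные значения для дробей
--     q, p = 1, a0
--     prev_q_2, prev_q = 0, 1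
--     prev_p_2, prev_p = 1, a0
--
--     for a in period:
--         p, q = a * prev_p + prev_p_2, a * prev_q + prev_q_2
--         prev_p_2, prev_p = prev_p, p
--         prev_q_2, prev_q = prev_q, q
--
--     return p, q
-- ===== SOURCE B (Python) =====
-- def period_approx(a0: int, period) -> tuple[int, int]:
--     full = [a0] + list(period)
--     num, den = full[-1], 1
--     for a in reversed(full[:-1]):
--         num, den = a * num + den, num
--     return num, den
-- ===== Notes on version B (the rewrite author's own statement) =====
-- stated objective: alternative
-- what changed: Replaces the forward two-sequence (p,q) convergent recurrence with a single backward right-to-left fold that collapses the continued fraction [a0; period] from its innermost term outward, maintaining one num/den pair.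
import Mathlib
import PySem

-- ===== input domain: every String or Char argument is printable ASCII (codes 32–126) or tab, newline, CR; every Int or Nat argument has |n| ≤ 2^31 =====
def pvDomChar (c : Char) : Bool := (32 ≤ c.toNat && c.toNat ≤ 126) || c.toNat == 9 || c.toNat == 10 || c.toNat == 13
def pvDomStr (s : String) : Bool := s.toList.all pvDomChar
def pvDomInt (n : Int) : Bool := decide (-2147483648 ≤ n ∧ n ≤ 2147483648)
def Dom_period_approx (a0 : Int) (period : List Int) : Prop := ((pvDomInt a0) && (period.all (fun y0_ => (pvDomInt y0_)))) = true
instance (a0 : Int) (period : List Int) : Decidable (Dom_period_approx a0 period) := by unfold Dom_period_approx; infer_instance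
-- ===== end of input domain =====

-- B replaces A's forward two-sequence convergent recurrence by a backward right-to-left
-- collapse of the continued fraction [a0; period] into one num/den pair (alternative decomposition).


-- ===== PORT A =====
-- state is (q, p, prev_q_2, prev_q, prev_p_2, prev_p), exactly A's loop body
def pvStepA (s : Int × Int × Int × Int × Int × Int) (a : Int) :
    Int × Int × Int × Int × Int × Int :=
  let p := a * s.2.2.2.2.2 + s.2.2.2.2.1
  let q := a * s.2.2.2.1 + s.2.2.1
  (q, p, s.2.2.2.1, q, s.2.2.2.2.2, p)

def period_approx (a0 : Int) (period : List Int) : Int × Int :=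
  let st := period.foldl pvStepA (1, a0, 0, 1, 1, a0)
  (st.2.1, st.1)

-- ===== PORT B =====
-- step: num, den = a * num + den, num
def pvStepB (s : Int × Int) (a : Int) : Int × Int := (a * s.1 + s.2, s.1)

def period_approx_alt (a0 : Int) (period : List Int) : Int × Int :=
  let full := a0 :: period
  (full.dropLast).reverse.foldl pvStepB (full.getLast (List.cons_ne_nil a0 period), 1)

-- ===== PRECONDITION & SPEC =====
def Spec_period_approx (a0 : Int) (period : List Int) (out : Int × Int) : Prop := out = period_approx_alt a0 period
instance (a0 : Int) (period : List Int) (out : Int × Int) : Decidable (Spec_period_approx a0 period out) := by unfold Spec_period_approx; infer_instance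

-- ===== CLAIM (what is proved, stated in full; the proofs are below) =====
def Claim_equal_period_approx : Prop := ∀ (a0 : Int) (period : List Int), Dom_period_approx a0 period → Spec_period_approx a0 period (period_approx a0 period)

-- ===== LEMMAS AND PROOFS =====
-- 2×2 integer matrices (a b / c d) as flat 4-tuples; both ports compute columns of
-- products of M(a) = (a 1 / 1 0).
def pvMul (m n : Int × Int × Int × Int) : Int × Int × Int × Int :=
  (m.1 * n.1 + m.2.1 * n.2.2.1, m.1 * n.2.1 + m.2.1 * n.2.2.2,
   m.2.2.1 * n.1 + m.2.2.2 * n.2.2.1, m.2.2.1 * n.2.1 + m.2.2.2 * n.2.2.2)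

def pvM (a : Int) : Int × Int × Int × Int := (a, 1, 1, 0)

def pvP : List Int → Int × Int × Int × Int
  | [] => (1, 0, 0, 1)
  | a :: l => pvMul (pvM a) (pvP l)

theorem pvMul_one (m : Int × Int × Int × Int) : pvMul m (1, 0, 0, 1) = m := by
  obtain ⟨a, b, c, d⟩ := m
  simp [pvMul]

theorem pvMul_assoc (m n k : Int × Int × Int × Int) :
    pvMul (pvMul m n) k = pvMul m (pvMul n k) := by
  obtain ⟨a, b, c, d⟩ := m; obtain ⟨e, f, g, h⟩ := n; obtain ⟨i, j, x, y⟩ := k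
  simp only [pvMul, Prod.mk.injEq]
  refine ⟨by ring, by ring, by ring, by ring⟩

-- encode a matrix (pp pp2 / qq qq2) as A's 6-tuple state
def pvEnc (m : Int × Int × Int × Int) : Int × Int × Int × Int × Int × Int :=
  (m.2.2.1, m.1, m.2.2.2, m.2.2.1, m.2.1, m.1)

theorem pvStepA_enc (m : Int × Int × Int × Int) (a : Int) :
    pvStepA (pvEnc m) a = pvEnc (pvMul m (pvM a)) := by
  obtain ⟨p, q, r, s⟩ := m
  simp only [pvStepA, pvEnc, pvMul, pvM, Prod.mk.injEq]
  refine ⟨by ring, by ring, by ring, by ring, by ring, by ring⟩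

theorem pvFoldA (l : List Int) (m : Int × Int × Int × Int) :
    l.foldl pvStepA (pvEnc m) = pvEnc (pvMul m (pvP l)) := by
  induction l generalizing m with
  | nil => simp [pvP, pvMul_one]
  | cons a l ih =>
      simp only [List.foldl_cons, pvStepA_enc, ih, pvP, ← pvMul_assoc]

theorem pvFoldB (l : List Int) (h : l ≠ []) :
    (l.dropLast).reverse.foldl pvStepB (l.getLast h, 1) = ((pvP l).1, (pvP l).2.2.1) := by
  induction l with
  | nil => exact absurd rfl h
  | cons a l ih =>
      cases l with
      | nil =>
          simp [pvP, pvMul, pvM]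
      | cons b l' =>
          have hne : b :: l' ≠ [] := List.cons_ne_nil b l'
          have hd : (a :: b :: l').dropLast = a :: (b :: l').dropLast := rfl
          have hl : (a :: b :: l').getLast (List.cons_ne_nil a (b :: l')) =
              (b :: l').getLast hne := List.getLast_cons hne
          rw [hd, hl, List.reverse_cons, List.foldl_append, ih hne]
          simp only [List.foldl_cons, List.foldl_nil, pvStepB, pvP, pvMul, pvM, Prod.mk.injEq]
          exact ⟨by ring, by ring⟩

-- ===== VERDICT (by name: the statement is the Claim_ definition above) =====
theorem period_approx_spec : Claim_equal_period_approx := by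
  intro a0 period _
  unfold Spec_period_approx period_approx period_approx_alt
  have h0 : ((1 : Int), a0, (0 : Int), (1 : Int), (1 : Int), a0) = pvEnc (pvM a0) := by
    simp [pvEnc, pvM]
  rw [h0, pvFoldA, pvFoldB (a0 :: period) (List.cons_ne_nil a0 period)]
  simp [pvEnc, pvP]
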